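-- pv_equiv track=rewrite | github.com/Paramee0598/Data_Structures_ExAndTest | ch10/ex105.py | min_box
-- ===== SOURCE A (Python) =====
-- def min_box(lst, numBox):
--     left = max(lst)  ; right = sum(lst)
--     while left <= right:
--         box_size = (left+right)//2 \
--         ; sumBox = 0 ; i = 0
--         while i < len(lst):
--             weight = 0
--             while i < len(lst) and weight + lst[i] <= box_size:  # put item in box
--                 weight += lst[i]
--                 i += 1
--             sumBox += 1
--         if sumBox <= numBox:  # too large
--             right = box_size - 1
--         else:  # too light
--             left = box_size + 1
--     return left
-- ===== SOURCE B (Python) =====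
-- def min_box(lst, numBox):
--     def boxes_needed(c):
--         boxes, weight = 1, 0
--         for x in lst:
--             if weight + x <= c:
--                 weight += x
--             else:
--                 boxes, weight = boxes + 1, x
--         return boxes
--
--     def search(lo, hi):
--         if lo > hi:
--             return lo
--         mid = (lo + hi) // 2
--         if boxes_needed(mid) <= numBox:
--             return search(lo, mid - 1)
--         return search(mid + 1, hi)
--
--     return search(max(lst), sum(lst))
-- ===== Notes on version B (the rewrite author's own statement) =====
-- stated objective: simpler
-- what changed: The triple-nested greedy counting loop becomes a single-pass fold over the items maintaining (open boxes, current weight), and the iterative while-loop bisection becomes a recursive search over the interval; bisection itself must be kept because greedy feasibility is non-monotone on lists with negative items, so the hinted first-feasible linear scan would not match A.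
import Mathlib
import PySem

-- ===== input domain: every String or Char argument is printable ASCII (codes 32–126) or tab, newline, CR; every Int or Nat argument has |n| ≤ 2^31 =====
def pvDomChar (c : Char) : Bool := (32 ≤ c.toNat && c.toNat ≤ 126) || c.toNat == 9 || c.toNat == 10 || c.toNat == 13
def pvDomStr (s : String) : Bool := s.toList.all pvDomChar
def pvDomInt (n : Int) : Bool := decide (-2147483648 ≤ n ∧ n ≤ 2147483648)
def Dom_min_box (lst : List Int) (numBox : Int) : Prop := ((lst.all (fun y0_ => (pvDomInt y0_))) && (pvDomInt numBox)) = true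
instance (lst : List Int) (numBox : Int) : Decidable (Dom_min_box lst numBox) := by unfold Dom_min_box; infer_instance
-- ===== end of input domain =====

-- B restructures A: the triple-nested greedy counting loop becomes a single-pass fold keeping
-- (boxes, current weight), and the iterative bisection becomes a recursive interval search;
-- bisection itself is kept because greedy feasibility is non-monotone when items can be negative.

-- ===== PORT A =====
-- inner while loop of A: advances (i, weight) while the next item fits in the current box.
-- lst.getD i 0 is Python's lst[i]: every access has 0 ≤ i < len(lst).
def pvInnerA (lst : List Int) (c : Int) (i : Nat) (w : Int) : Nat × Int :=
  if _h : i < lst.length ∧ w + lst.getD i 0 ≤ c then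
    pvInnerA lst c (i + 1) (w + lst.getD i 0)
  else (i, w)
termination_by lst.length - i
decreasing_by omega

-- outer while loop of A (one iteration per box). fuel only makes the recursion structural:
-- every call A performs has c ≥ max(lst), so each iteration consumes ≥ 1 item and
-- fuel = lst.length + 1 is never exhausted.
def pvOuterA (lst : List Int) (c : Int) : Nat → Nat → Int → Int
  | 0, _, sumBox => sumBox
  | fuel + 1, i, sumBox =>
    if i < lst.length then pvOuterA lst c fuel (pvInnerA lst c i 0).1 (sumBox + 1)
    else sumBox

def pvCountA (lst : List Int) (c : Int) : Int := pvOuterA lst c (lst.length + 1) 0 0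

-- A's binary-search while loop
def pvLoopA (lst : List Int) (numBox left right : Int) : Int :=
  if h : left ≤ right then
    let box_size := PySem.Int.floordiv (left + right) 2
    if pvCountA lst box_size ≤ numBox then pvLoopA lst numBox left (box_size - 1)
    else pvLoopA lst numBox (box_size + 1) right
  else left
termination_by (right + 1 - left).toNat
decreasing_by
  · have := PySem.Int.floordiv_two_mid_bounds h; omega
  · have := PySem.Int.floordiv_two_mid_bounds h; omega

-- Python max(lst) raises ValueError on []; that input is outside Pre_, .getD 0 is arbitrary there.
def min_box (lst : List Int) (numBox : Int) : Int :=
  pvLoopA lst numBox ((PySem.List.max? lst id).getD 0) lst.sum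

-- ===== PORT B =====
def pvFoldStep (c : Int) (p : Int × Int) (x : Int) : Int × Int :=
  if p.2 + x ≤ c then (p.1, p.2 + x) else (p.1 + 1, x)

def pvBoxesNeeded (lst : List Int) (c : Int) : Int :=
  (lst.foldl (pvFoldStep c) (1, 0)).1

def pvSearchB (lst : List Int) (numBox lo hi : Int) : Int :=
  if h : lo ≤ hi then
    let mid := PySem.Int.floordiv (lo + hi) 2
    if pvBoxesNeeded lst mid ≤ numBox then pvSearchB lst numBox lo (mid - 1)
    else pvSearchB lst numBox (mid + 1) hi
  else lo
termination_by (hi + 1 - lo).toNat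
decreasing_by
  · have := PySem.Int.floordiv_two_mid_bounds h; omega
  · have := PySem.Int.floordiv_two_mid_bounds h; omega

def min_box_alt (lst : List Int) (numBox : Int) : Int :=
  pvSearchB lst numBox ((PySem.List.max? lst id).getD 0) lst.sum

-- ===== PRECONDITION & SPEC =====
-- Pre_ excludes only the empty list, on which Python's max(lst) raises ValueError.
def Pre_min_box (lst : List Int) (numBox : Int) : Prop := lst ≠ []
instance (lst : List Int) (numBox : Int) : Decidable (Pre_min_box lst numBox) := by
  unfold Pre_min_box; infer_instance

def pvWitness_min_box : List Int × Int := ([2, 3, 1], 2)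

def Spec_min_box (lst : List Int) (numBox : Int) (out : Int) : Prop := out = min_box_alt lst numBox
instance (lst : List Int) (numBox : Int) (out : Int) : Decidable (Spec_min_box lst numBox out) := by
  unfold Spec_min_box; infer_instance

-- ===== CLAIM (what is proved, stated in full; the proofs are below) =====
def Claim_equal_min_box : Prop := ∀ (lst : List Int) (numBox : Int), Dom_min_box lst numBox → Pre_min_box lst numBox → Spec_min_box lst numBox (min_box lst numBox)

-- ===== LEMMAS AND PROOFS =====

-- the inner while loop agrees with a run of "fits" steps of the fold
theorem pvInner_fold (lst : List Int) (c : Int) (i : Nat) (w b : Int) :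
    List.foldl (pvFoldStep c) (b, w) (lst.drop i)
      = List.foldl (pvFoldStep c) (b, (pvInnerA lst c i w).2) (lst.drop (pvInnerA lst c i w).1)
    ∧ i ≤ (pvInnerA lst c i w).1
    ∧ ((pvInnerA lst c i w).1 < lst.length →
        ¬ ((pvInnerA lst c i w).2 + lst.getD (pvInnerA lst c i w).1 0 ≤ c)) := by
  fun_induction pvInnerA lst c i w with
  | case1 i w h ih =>
    obtain ⟨hi, hfit⟩ := h
    have hdrop : lst.drop i = lst.getD i 0 :: lst.drop (i + 1) := by
      rw [List.getD_eq_getElem lst 0 hi]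
      exact (List.getElem_cons_drop hi).symm
    refine ⟨?_, ?_, ih.2.2⟩
    · rw [hdrop]
      simp only [List.foldl_cons, pvFoldStep, hfit, if_pos]
      exact ih.1
    · have := ih.2.1; omega
  | case2 i w h =>
    refine ⟨rfl, le_refl _, ?_⟩
    intro hi hfit
    exact h ⟨hi, hfit⟩

-- the outer while loop agrees with the fold, restarting at a point where the current box is full
theorem pvOuter_fold (lst : List Int) (c : Int) (hmax : ∀ x ∈ lst, x ≤ c) :
    ∀ (n : Nat) (i : Nat) (b w : Int), lst.length - i ≤ n →
      (i < lst.length → ¬ (w + lst.getD i 0 ≤ c)) →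
      pvOuterA lst c n i b = (List.foldl (pvFoldStep c) (b, w) (lst.drop i)).1 := by
  intro n
  induction n with
  | zero =>
    intro i b w hn _
    have : lst.length ≤ i := by omega
    simp [pvOuterA, List.drop_eq_nil_of_le this]
  | succ n ih =>
    intro i b w hn hnofit
    by_cases hi : i < lst.length
    · have hx : lst.getD i 0 ∈ lst := by
        rw [List.getD_eq_getElem lst 0 hi]; exact List.getElem_mem hi
      have hxc : (0 : Int) + lst.getD i 0 ≤ c := by
        have := hmax _ hx; omega
      -- one step of the inner loop from (i, 0) consumes lst[i]
      have hinner : pvInnerA lst c i 0 = pvInnerA lst c (i + 1) (0 + lst.getD i 0) := by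
        rw [pvInnerA, dif_pos ⟨hi, hxc⟩]
      have hdrop : lst.drop i = lst.getD i 0 :: lst.drop (i + 1) := by
        rw [List.getD_eq_getElem lst 0 hi]
        exact (List.getElem_cons_drop hi).symm
      obtain ⟨hfold, hle, hstop⟩ := pvInner_fold lst c (i + 1) (0 + lst.getD i 0) (b + 1)
      have hnf : ¬ (w + lst.getD i 0 ≤ c) := hnofit hi
      have hstep : pvFoldStep c (b, w) (lst.getD i 0) = (b + 1, lst.getD i 0) := by
        simp only [pvFoldStep]; rw [if_neg hnf]
      rw [show pvOuterA lst c (n + 1) i b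
            = pvOuterA lst c n (pvInnerA lst c i 0).1 (b + 1) from by
          rw [pvOuterA, if_pos hi]]
      rw [hinner, ih _ _ _ (by omega) hstop, ← hfold, hdrop, List.foldl_cons, hstep, zero_add]
    · have : lst.length ≤ i := by omega
      simp [pvOuterA, hi, List.drop_eq_nil_of_le this]

-- on a nonempty list, A's box count equals B's fold count whenever c ≥ every item
theorem pvCount_eq (lst : List Int) (c : Int) (hne : lst ≠ [])
    (hmax : ∀ x ∈ lst, x ≤ c) : pvCountA lst c = pvBoxesNeeded lst c := by
  have hi : 0 < lst.length := List.length_pos_of_ne_nil hne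
  have hx : lst.getD 0 0 ∈ lst := by
    rw [List.getD_eq_getElem lst 0 hi]; exact List.getElem_mem hi
  have hxc : (0 : Int) + lst.getD 0 0 ≤ c := by have := hmax _ hx; omega
  have hinner : pvInnerA lst c 0 0 = pvInnerA lst c 1 (0 + lst.getD 0 0) := by
    rw [pvInnerA, dif_pos ⟨hi, hxc⟩]
  obtain ⟨hfold, hle, hstop⟩ := pvInner_fold lst c 1 (0 + lst.getD 0 0) 1
  have houter := pvOuter_fold lst c hmax lst.length (pvInnerA lst c 0 0).1 1
      (pvInnerA lst c 0 0).2 (by omega) (by rw [hinner]; exact hstop)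
  have hlst : lst = lst.getD 0 0 :: lst.drop 1 := by
    have : lst.drop 0 = lst.getD 0 0 :: lst.drop 1 := by
      rw [List.getD_eq_getElem lst 0 hi]
      exact (List.getElem_cons_drop hi).symm
    simpa using this
  have hstep : pvFoldStep c (1, 0) (lst.getD 0 0) = (1, 0 + lst.getD 0 0) := by
    simp only [pvFoldStep]; rw [if_pos hxc]
  unfold pvCountA pvBoxesNeeded
  rw [show pvOuterA lst c (lst.length + 1) 0 0
        = pvOuterA lst c lst.length (pvInnerA lst c 0 0).1 (0 + 1) from by
      rw [pvOuterA, if_pos hi]]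
  rw [show ((0 : Int) + 1) = 1 from by norm_num]
  rw [houter, hinner, ← hfold]
  conv_rhs => rw [hlst, List.foldl_cons, hstep]

-- A's iterative bisection equals B's recursive bisection while left stays ≥ every item
theorem pvLoop_eq (lst : List Int) (numBox : Int) (hne : lst ≠ []) :
    ∀ (left right : Int), (∀ x ∈ lst, x ≤ left) →
      pvLoopA lst numBox left right = pvSearchB lst numBox left right := by
  intro left right
  fun_induction pvLoopA lst numBox left right with
  | case1 left right h box_size hc ih =>
    intro hmax
    have hmid := PySem.Int.floordiv_two_mid_bounds h
    have hmaxmid : ∀ x ∈ lst, x ≤ PySem.Int.floordiv (left + right) 2 := by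
      intro x hx; have := hmax x hx; omega
    have hcb : pvBoxesNeeded lst (PySem.Int.floordiv (left + right) 2) ≤ numBox := by
      rw [← pvCount_eq lst _ hne hmaxmid]; exact hc
    rw [ih hmax]
    conv_rhs => rw [pvSearchB]
    rw [dif_pos h]
    simp only [if_pos hcb]
    rfl
  | case2 left right h box_size hc ih =>
    intro hmax
    have hmid := PySem.Int.floordiv_two_mid_bounds h
    have hmaxmid : ∀ x ∈ lst, x ≤ PySem.Int.floordiv (left + right) 2 := by
      intro x hx; have := hmax x hx; omega
    have hcb : ¬ pvBoxesNeeded lst (PySem.Int.floordiv (left + right) 2) ≤ numBox := by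
      rw [← pvCount_eq lst _ hne hmaxmid]; exact hc
    have hmax' : ∀ x ∈ lst, x ≤ PySem.Int.floordiv (left + right) 2 + 1 := by
      intro x hx; have := hmax x hx; omega
    rw [ih hmax']
    conv_rhs => rw [pvSearchB]
    rw [dif_pos h]
    simp only [if_neg hcb]
    rfl
  | case3 left right h =>
    intro _
    rw [pvSearchB, dif_neg h]

-- ===== VERDICT (by name: the statement is the Claim_ definition above) =====
theorem min_box_spec : Claim_equal_min_box := by
  intro lst numBox _ hne
  unfold Spec_min_box min_box min_box_alt
  apply pvLoop_eq lst numBox hne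
  intro x hx
  obtain ⟨y, ys, rfl⟩ := List.exists_cons_of_ne_nil hne
  cases hm : PySem.List.max? (y :: ys) id with
  | none =>
    rw [PySem.List.max?_eq_none_iff] at hm
    exact absurd hm (by simp)
  | some m =>
    have := PySem.List.max?_isMax hm x hx
    simpa [hm] using this
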